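-- pv_equiv track=rewrite | github.com/xjdeng/sd_tools | filetools.py | find_and_add_substrings
-- ===== SOURCE A (Python) =====
-- def find_and_add_substrings(s, t):
--     result = []
--     start = 0
--     while True:
--         index = s.find(t, start)
--         if index == -1:
--             break
--         result.append(s[:index + len(t)])
--         start = index + 1
--     return result
-- ===== SOURCE B (Python) =====
-- def find_and_add_substrings(s, t):
--     n = len(s)
--     return [s[:i + len(t)] for i in range(n + 1) if s.startswith(t, i)]
-- ===== Notes on version B (the rewrite author's own statement) =====
-- stated objective: idiomatic
-- what changed: Replaces the stateful while-loop around s.find (restarting the search at each hit) with a single comprehension that scans every candidate start position 0..len(s) and tests s.startswith(t, i), mapping each match to its prefix.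
import Mathlib
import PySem

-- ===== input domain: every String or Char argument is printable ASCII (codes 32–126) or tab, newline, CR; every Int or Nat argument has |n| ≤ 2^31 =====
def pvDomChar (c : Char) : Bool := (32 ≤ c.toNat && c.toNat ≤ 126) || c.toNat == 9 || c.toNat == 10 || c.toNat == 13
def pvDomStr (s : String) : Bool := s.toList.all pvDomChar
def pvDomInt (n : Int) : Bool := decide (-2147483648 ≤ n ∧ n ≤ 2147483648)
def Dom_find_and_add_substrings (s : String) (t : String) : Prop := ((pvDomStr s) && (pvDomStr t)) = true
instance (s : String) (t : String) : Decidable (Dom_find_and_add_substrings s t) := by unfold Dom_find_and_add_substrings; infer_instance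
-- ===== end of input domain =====

-- B replaces A's stateful while-loop around s.find with a single comprehension scanning
-- every candidate start position and testing startswith; same results, idiomatic one-liner.


-- ===== PORT A =====
-- A's 'while True' loop; 'start' strictly increases each iteration and the loop exits once
-- start > len(s), so fuel = len(s) + 2 is only a totality guard, never reached before exit.
def pvGoA (s t : List Char) (start : Nat) (fuel : Nat) (acc : List String) : List String :=
  match fuel with
  | 0 => acc
  | fuel + 1 =>
    let idx := PySem.Chars.findFrom s t (start : Int) none     -- index = s.find(t, start)
    if idx = -1 then acc
    else pvGoA s t (idx.toNat + 1) fuel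
      (acc ++ [String.ofList (PySem.List.slice s none (some (idx + (t.length : Int))))])  -- s[:index+len(t)]

def find_and_add_substrings (s : String) (t : String) : List String :=
  pvGoA s.toList t.toList 0 (s.toList.length + 2) []

-- ===== PORT B =====
def find_and_add_substrings_alt (s : String) (t : String) : List String :=
  ((List.range (s.toList.length + 1)).filter
      (fun i => PySem.Chars.startswith (s.toList.drop i) t.toList)).map      -- s.startswith(t, i)
    (fun i => String.ofList (PySem.List.slice s.toList none (some ((i : Int) + (t.toList.length : Int)))))  -- s[:i+len(t)]

-- ===== PRECONDITION & SPEC =====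
def Spec_find_and_add_substrings (s : String) (t : String) (out : List String) : Prop := out = find_and_add_substrings_alt s t
instance (s : String) (t : String) (out : List String) : Decidable (Spec_find_and_add_substrings s t out) := by unfold Spec_find_and_add_substrings; infer_instance

-- ===== CLAIM (what is proved, stated in full; the proofs are below) =====
def Claim_equal_find_and_add_substrings : Prop := ∀ (s : String) (t : String), Dom_find_and_add_substrings s t → Spec_find_and_add_substrings s t (find_and_add_substrings s t)

-- ===== LEMMAS AND PROOFS =====

-- s.find(t, start) is -1 once start runs past len(s) (CPython quirk kept by PySem).
theorem pv_findFrom_of_gt (s t : List Char) (k : Nat) (h : s.length < k) :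
    PySem.Chars.findFrom s t (k : Int) none = -1 := by
  simp only [PySem.Chars.findFrom]
  split_ifs with h1 h2 h3 <;> first | rfl | omega

-- the filtered match list from k, as B computes it (restricted to starts ≥ k)
def pvF (s t : List Char) (k : Nat) : List Nat :=
  (List.range (s.length + 1)).filter
    (fun i => decide (k ≤ i) && PySem.Chars.startswith (s.drop i) t)

theorem pvF_eq_nil (s t : List Char) (k : Nat)
    (h : ∀ i, k ≤ i → i ≤ s.length → ¬ t <+: s.drop i) : pvF s t k = [] := by
  refine List.filter_eq_nil_iff.mpr ?_
  intro i hi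
  simp only [List.mem_range] at hi
  simp only [Bool.and_eq_true, decide_eq_true_eq, PySem.Chars.startswith_iff, not_and]
  intro hk
  exact h i hk (by omega)

theorem pvF_step (s t : List Char) (k j : Nat) (hkj : k ≤ j) (hj : j ≤ s.length)
    (hmatch : t <+: s.drop j) (hmin : ∀ i, k ≤ i → i < j → ¬ t <+: s.drop i) :
    pvF s t k = j :: pvF s t (j + 1) := by
  have hsplit : List.range (s.length + 1)
      = List.range' 0 (j + 1) ++ List.range' (j + 1) (s.length - j) := by
    rw [List.range_eq_range', show s.length + 1 = (j + 1) + (s.length - j) by omega]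
    simpa using (List.range'_append_1 (s := 0) (m := j + 1) (n := s.length - j)).symm
  have hsplit' : List.range' 0 (j + 1) = List.range' 0 j ++ [j] := by
    have := List.range'_append (s := 0) (m := j) (n := 1) (step := 1)
    simpa using this.symm
  unfold pvF
  rw [hsplit, hsplit', List.filter_append, List.filter_append,
      List.filter_append, List.filter_append]
  have h1 : (List.range' 0 j).filter
      (fun i => decide (k ≤ i) && PySem.Chars.startswith (s.drop i) t) = [] := by
    refine List.filter_eq_nil_iff.mpr ?_
    intro i hi
    have hi' : i < j := by
      have := List.mem_range'_1.mp hi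
      omega
    simp only [Bool.and_eq_true, decide_eq_true_eq, PySem.Chars.startswith_iff, not_and]
    intro hk
    exact hmin i hk hi'
  have h1' : (List.range' 0 j).filter
      (fun i => decide (j + 1 ≤ i) && PySem.Chars.startswith (s.drop i) t) = [] := by
    refine List.filter_eq_nil_iff.mpr ?_
    intro i hi
    have hi' : i < j := by
      have := List.mem_range'_1.mp hi
      omega
    simp [show ¬ (j + 1 ≤ i) by omega]
  have h2 : ([j]).filter
      (fun i => decide (k ≤ i) && PySem.Chars.startswith (s.drop i) t) = [j] := by
    simp [hkj, PySem.Chars.startswith_iff, hmatch]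
  have h2' : ([j]).filter
      (fun i => decide (j + 1 ≤ i) && PySem.Chars.startswith (s.drop i) t) = [] := by
    simp
  have h3 : (List.range' (j + 1) (s.length - j)).filter
        (fun i => decide (k ≤ i) && PySem.Chars.startswith (s.drop i) t)
      = (List.range' (j + 1) (s.length - j)).filter
        (fun i => decide (j + 1 ≤ i) && PySem.Chars.startswith (s.drop i) t) := by
    refine List.filter_congr ?_
    intro i hi
    have hi' : j + 1 ≤ i := (List.mem_range'_1.mp hi).1
    simp [hi', show k ≤ i by omega]
  rw [h1, h1', h2, h2', h3]
  simp

-- A's loop from position k produces exactly B's matches ≥ k, in order.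
theorem pvGoA_eq (s t : List Char) (fuel : Nat) : ∀ (k : Nat) (acc : List String),
    s.length + 2 - k ≤ fuel →
    pvGoA s t k fuel acc = acc ++ (pvF s t k).map
      (fun i => String.ofList (PySem.List.slice s none (some ((i : Int) + (t.length : Int))))) := by
  induction fuel with
  | zero =>
    intro k acc hfuel
    have hk : s.length + 2 ≤ k := by omega
    rw [pvF_eq_nil s t k (fun i hi hle _ => by omega)]
    simp [pvGoA]
  | succ fuel ih =>
    intro k acc hfuel
    simp only [pvGoA]
    by_cases hidx : PySem.Chars.findFrom s t (k : Int) none = -1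
    · simp only [hidx]
      by_cases hk : k ≤ s.length
      · have hnoinf : ¬ t <:+: s.drop k :=
          (PySem.Chars.findFrom_natCast_eq_neg_one_iff s t k hk).mp hidx
        rw [pvF_eq_nil s t k ?_]
        · simp
        · intro i hi _ hpre
          exact hnoinf (hpre.isInfix.trans (List.IsSuffix.isInfix (by
            have : s.drop i = (s.drop k).drop (i - k) := by
              rw [List.drop_drop]; congr 1; omega
            rw [this]; exact List.drop_suffix _ _)))
      · rw [pvF_eq_nil s t k (fun i hi hle _ => by omega)]
        simp
    · have hk : k ≤ s.length := by
        by_contra hk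
        exact hidx (pv_findFrom_of_gt s t k (by omega))
      obtain ⟨hge, hpre, hmin⟩ := PySem.Chars.findFrom_natCast_spec s t k hk hidx
      set idx := PySem.Chars.findFrom s t (k : Int) none with hidxdef
      have hidx0 : 0 ≤ idx := le_trans (by exact_mod_cast Int.natCast_nonneg k) hge
      set j := idx.toNat with hjdef
      have hidxj : idx = (j : Int) := (Int.toNat_of_nonneg hidx0).symm
      have hkj : k ≤ j := by omega
      have hjle : j ≤ s.length := by
        by_contra hjle
        have hdropnil : s.drop j = [] := List.drop_eq_nil_of_le (by omega)
        have ht : t = [] := List.prefix_nil.mp (hdropnil ▸ hpre)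
        exact hmin s.length hk (by omega) (ht ▸ List.nil_prefix)
      simp only [hidx]
      rw [ih (j + 1) _ (by omega), pvF_step s t k j hkj hjle hpre (fun i hi hij => hmin i hi hij)]
      simp [hidxj, List.append_assoc]

-- ===== VERDICT (by name: the statement is the Claim_ definition above) =====
theorem find_and_add_substrings_spec : Claim_equal_find_and_add_substrings := by
  intro s t _
  unfold Spec_find_and_add_substrings find_and_add_substrings find_and_add_substrings_alt
  rw [pvGoA_eq s.toList t.toList (s.toList.length + 2) 0 [] (by omega)]
  unfold pvF
  simp
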